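-- pv_equiv track=rewrite | github.com/thdefn/myAlgorithm | 1/12222.py | solution
-- ===== SOURCE A (Python) =====
-- def solution(delay, N):
--     answer = 0
--     # 1+1*2+(1*2)+(1*2+1*2)+(1*2+1*2+1*2)
--     a = []  # 분열 불가
--     b = 1  # 분열 가능
--     for i in range(1, N + 1):
--         b = b
--         size = 0
--         for k in range(len(a)):
--             a[k]=a[k]-1
--             if(a[k]==0):
--                 size = size+1
--         b = b + size
--         for j in range(b):
--             a.append(delay)
--
--     answer = b + len(a)
--     return answer
-- ===== SOURCE B (Python) =====
-- def solution(delay, N):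
--     bs = [1]      # bs[t] = number of division-capable cells after step t
--     last = 1
--     total = 0     # total cells ever appended to the waiting list
--     for s in range(1, N + 1):
--         size = bs[s - delay] if delay >= 1 and s - delay >= 1 else 0
--         last = last + size
--         bs.append(last)
--         total = total + last
--     return last + total
-- ===== Notes on version B (the rewrite author's own statement) =====
-- stated objective: faster
-- what changed: B replaces A's per-cell simulation (a list growing by b entries per step, rescanned and decremented every step) with an O(N) recurrence on per-step counts: cells maturing at step s are exactly those appended at step s - delay, so only the list of per-step counts, the current count and a running total are kept.
import Mathlib
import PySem

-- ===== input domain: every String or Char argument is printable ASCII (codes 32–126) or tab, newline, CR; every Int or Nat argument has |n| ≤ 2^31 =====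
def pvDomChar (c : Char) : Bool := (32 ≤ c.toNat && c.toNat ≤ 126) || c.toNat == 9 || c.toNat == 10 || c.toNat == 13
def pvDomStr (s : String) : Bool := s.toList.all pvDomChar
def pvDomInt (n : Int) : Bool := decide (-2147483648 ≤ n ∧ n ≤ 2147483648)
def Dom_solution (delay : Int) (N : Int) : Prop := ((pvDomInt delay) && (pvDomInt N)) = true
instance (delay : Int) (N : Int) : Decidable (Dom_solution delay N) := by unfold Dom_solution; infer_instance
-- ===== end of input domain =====

-- B replaces A's simulation of every individual cell (a list that grows exponentially)
-- by an O(N) recurrence on per-step counts: maturations at step s are exactly the cells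
-- added at step s - delay, so only the per-step counts and their running sum are kept.

-- ===== PORT A =====
def solution (delay : Int) (N : Int) : Int :=
  let st :=
    (PySem.List.pyRange 1 (N + 1) 1).foldl
      (fun (st : List Int × Int) _ =>
        let p := st.1.foldl
          (fun (q : List Int × Int) x =>
            (q.1 ++ [x - 1], if x - 1 = 0 then q.2 + 1 else q.2))
          ([], (0 : Int))
        let b := st.2 + p.2
        let a := (PySem.List.pyRange 0 b 1).foldl (fun (l : List Int) _ => l ++ [delay]) p.1
        (a, b))
      ([], (1 : Int))
  st.2 + (st.1.length : Int)

-- ===== PORT B =====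
def solution_alt (delay : Int) (N : Int) : Int :=
  let st :=
    (PySem.List.pyRange 1 (N + 1) 1).foldl
      (fun (st : List Int × Int × Int) s =>
        let size := if 1 ≤ delay ∧ 1 ≤ s - delay then PySem.List.pyGetD st.1 (s - delay) 0 else 0
        let last := st.2.1 + size
        (st.1 ++ [last], last, st.2.2 + last))
      ([1], (1 : Int), (0 : Int))
  st.2.1 + st.2.2

-- ===== PRECONDITION & SPEC =====
def Spec_solution (delay : Int) (N : Int) (out : Int) : Prop := out = solution_alt delay N
instance (delay : Int) (N : Int) (out : Int) : Decidable (Spec_solution delay N out) := by unfold Spec_solution; infer_instance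

-- ===== CLAIM (what is proved, stated in full; the proofs are below) =====
def Claim_equal_solution : Prop := ∀ (delay : Int) (N : Int), Dom_solution delay N → Spec_solution delay N (solution delay N)

-- ===== LEMMAS AND PROOFS =====

-- history of the per-step count of division-capable cells: (bhist delay n).getD t 0 = b after step t
def bhist (delay : Int) : Nat → List Int
  | 0 => [1]
  | n + 1 =>
    let l := bhist delay n
    let size := if 1 ≤ delay ∧ 1 ≤ ((n : Int) + 1) - delay
                then l.getD (((n : Int) + 1) - delay).toNat 0 else 0
    l ++ [l.getD n 0 + size]

def bseq (delay : Int) (n : Nat) : Int := (bhist delay n).getD n 0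

theorem length_bhist (delay : Int) (n : Nat) : (bhist delay n).length = n + 1 := by
  induction n with
  | zero => rfl
  | succ n ih => simp [bhist, ih]

theorem bhist_getD (delay : Int) (m n : Nat) (h : n ≤ m) :
    (bhist delay m).getD n 0 = bseq delay n := by
  induction m with
  | zero => interval_cases n; rfl
  | succ m ih =>
    rcases Nat.lt_or_ge n (m + 1) with h' | h'
    · rw [show bhist delay (m+1) = bhist delay m ++ _ from rfl,
        List.getD_append _ _ _ _ (by rw [length_bhist]; omega)]
      exact ih (by omega)
    · have : n = m + 1 := by omega
      subst this; rfl

theorem bseq_succ (delay : Int) (n : Nat) :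
    bseq delay (n + 1) = bseq delay n +
      (if 1 ≤ delay ∧ 1 ≤ ((n : Int) + 1) - delay
       then bseq delay (((n : Int) + 1) - delay).toNat else 0) := by
  have hlen : (bhist delay n).length = n + 1 := length_bhist delay n
  show (bhist delay n ++ [_]).getD (n+1) 0 = _
  rw [List.getD_append_right _ _ _ _ (by omega)]
  simp only [hlen]
  have : n + 1 - (n + 1) = 0 := by omega
  rw [this]
  simp only [List.getD_cons_zero]
  refine congrArg₂ (· + ·) rfl ?_
  split_ifs with h
  · exact bhist_getD delay n _ (by omega)
  · rfl

theorem bseq_pos (delay : Int) : ∀ n, 1 ≤ bseq delay n := by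
  intro n
  induction n using Nat.strong_induction_on with
  | _ n ih =>
    match n with
    | 0 => simp [bseq, bhist]
    | n + 1 =>
      rw [bseq_succ]
      have h1 : 1 ≤ bseq delay n := ih n (by omega)
      split_ifs with h
      · have : 1 ≤ bseq delay (((n : Int) + 1) - delay).toNat :=
          ih _ (by omega)
        omega
      · omega

-- total number of cells appended over the first n steps
def totsum (delay : Int) (n : Nat) : Int :=
  ((List.range n).map (fun t => bseq delay (t + 1))).sum

-- the multiset of per-cell counters after n steps, in A's order
def aList (delay : Int) (n : Nat) : List Int :=
  (List.range n).flatMap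
    (fun t => List.replicate (bseq delay (t + 1)).toNat (delay - (n : Int) + (t : Int) + 1))

-- ---------- B's loop invariant ----------

theorem b_inv (delay : Int) (n : Nat) :
    (PySem.List.pyRange 1 ((n : Int) + 1) 1).foldl
      (fun (st : List Int × Int × Int) s =>
        let size := if 1 ≤ delay ∧ 1 ≤ s - delay then PySem.List.pyGetD st.1 (s - delay) 0 else 0
        let last := st.2.1 + size
        (st.1 ++ [last], last, st.2.2 + last))
      ([1], (1 : Int), (0 : Int))
    = (bhist delay n, bseq delay n, totsum delay n) := by
  induction n with
  | zero =>
    rw [PySem.List.pyRange_one_eq_nil (by omega)]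
    simp [bhist, bseq, totsum]
  | succ n ih =>
    have hc : ((n + 1 : Nat) : Int) + 1 = ((n : Int) + 1) + 1 := by push_cast; ring
    rw [hc, PySem.List.pyRange_one_succ_right (show (1:Int) ≤ (n : Int) + 1 by omega),
      List.foldl_append, ih]
    simp only [List.foldl_cons, List.foldl_nil]
    have hsizeH :
        (if 1 ≤ delay ∧ 1 ≤ ((n : Int) + 1) - delay
         then PySem.List.pyGetD (bhist delay n) (((n : Int) + 1) - delay) 0 else 0)
        = (if 1 ≤ delay ∧ 1 ≤ ((n : Int) + 1) - delay
           then (bhist delay n).getD (((n : Int) + 1) - delay).toNat 0 else 0) := by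
      split_ifs with h
      · have hi : ((n : Int) + 1) - delay = (((((n : Int) + 1) - delay).toNat : Nat) : Int) := by
          omega
        conv_lhs => rw [hi]
        rw [PySem.List.pyGetD_natCast]
      · rfl
    have hsizeB :
        (if 1 ≤ delay ∧ 1 ≤ ((n : Int) + 1) - delay
         then (bhist delay n).getD (((n : Int) + 1) - delay).toNat 0 else 0)
        = (if 1 ≤ delay ∧ 1 ≤ ((n : Int) + 1) - delay
           then bseq delay (((n : Int) + 1) - delay).toNat else 0) := by
      split_ifs with h
      · exact bhist_getD delay n _ (by omega)
      · rfl
    refine Prod.ext ?_ (Prod.ext ?_ ?_)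
    · show bhist delay n ++ [bseq delay n + _] = bhist delay (n + 1)
      rw [hsizeH]
      rfl
    · show bseq delay n + _ = bseq delay (n + 1)
      rw [hsizeH, hsizeB, bseq_succ]
    · show totsum delay n + (bseq delay n + _) = totsum delay (n + 1)
      rw [hsizeH, hsizeB, ← bseq_succ]
      simp [totsum, List.range_succ]

-- ---------- A's loop invariant ----------

-- the inner decrement-and-count loop
theorem inner_loop (a : List Int) : ∀ (acc : List Int) (cnt : Int),
    a.foldl (fun (q : List Int × Int) x =>
        (q.1 ++ [x - 1], if x - 1 = 0 then q.2 + 1 else q.2)) (acc, cnt)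
    = (acc ++ a.map (· - 1), cnt + (a.count 1 : Int)) := by
  induction a with
  | nil => intro acc cnt; simp
  | cons x xs ih =>
    intro acc cnt
    simp only [List.foldl_cons, ih, List.map_cons, List.count_cons]
    by_cases hx : x = 1
    · subst hx; simp; ring_nf
    · have h1 : ¬ (x - 1 = 0) := by omega
      have h2 : (x == 1) = false := by simpa using hx
      simp [h1, h2]

-- the append loop
theorem append_loop (delay b : Int) (hb : 0 ≤ b) (l : List Int) :
    (PySem.List.pyRange 0 b 1).foldl (fun (l : List Int) _ => l ++ [delay]) l
    = l ++ List.replicate b.toNat delay := by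
  rw [show (fun (l : List Int) (_ : Int) => l ++ [delay])
        = (fun (acc : List Int) x => acc ++ [(fun (_ : Int) => delay) x]) from rfl,
    PySem.List.foldl_append_singleton_eq_map]
  congr 1
  rw [List.eq_replicate_iff]
  refine ⟨by rw [List.length_map, PySem.List.length_pyRange_one]; omega, ?_⟩
  intro y hy
  simp at hy
  omega

-- counting matches in a flatMap of replicates
theorem count_flatMap_rep (c : Nat → Nat) (v : Nat → Int) (x : Int) : ∀ n : Nat,
    ((List.range n).flatMap (fun t => List.replicate (c t) (v t))).count x
    = ((List.range n).map (fun t => if v t = x then c t else 0)).sum := by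
  intro n
  induction n with
  | zero => rfl
  | succ n ih =>
    rw [List.range_succ]
    simp only [List.flatMap_append, List.map_append, List.count_append, List.sum_append, ih,
      List.flatMap_cons, List.flatMap_nil, List.append_nil, List.map_cons, List.map_nil,
      List.sum_cons, List.sum_nil]
    by_cases h : v n = x
    · simp [h]
    · have h' : ¬ (x = v n) := fun hh => h hh.symm
      simp [List.count_replicate, beq_iff_eq]

-- a 0/1-supported sum over range
theorem sum_single (g : Nat → Nat) (j : Int) : ∀ n : Nat,
    ((List.range n).map (fun t : Nat => if (t : Int) = j then g t else 0)).sum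
    = if 0 ≤ j ∧ j < (n : Int) then g j.toNat else 0 := by
  intro n
  induction n with
  | zero =>
    simp only [List.range_zero, List.map_nil, List.sum_nil]
    rw [if_neg (by omega)]
  | succ n ih =>
    rw [List.range_succ]
    simp only [List.map_append, List.sum_append, ih, List.map_cons, List.map_nil,
      List.sum_cons, List.sum_nil, Nat.add_zero]
    push_cast
    by_cases hj : (n : Int) = j
    · rw [if_neg (show ¬(0 ≤ j ∧ j < (n : Int)) by omega), if_pos hj,
        if_pos (show 0 ≤ j ∧ j < (n : Int) + 1 by omega)]
      have hjt : j.toNat = n := by omega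
      rw [hjt]
      omega
    · rw [if_neg hj]
      by_cases h0 : 0 ≤ j ∧ j < (n : Int)
      · rw [if_pos h0, if_pos (show 0 ≤ j ∧ j < (n : Int) + 1 by omega)]
        omega
      · rw [if_neg h0, if_neg (show ¬(0 ≤ j ∧ j < (n : Int) + 1) by omega)]

theorem count_aList (delay : Int) (n : Nat) :
    ((aList delay n).count 1 : Int)
    = (if 1 ≤ delay ∧ 1 ≤ ((n : Int) + 1) - delay
       then bseq delay (((n : Int) + 1) - delay).toNat else 0) := by
  unfold aList
  rw [count_flatMap_rep]
  have heq : (fun t : Nat => if delay - (n : Int) + (t : Int) + 1 = 1 then (bseq delay (t + 1)).toNat else 0)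
      = (fun t : Nat => if (t : Int) = (n : Int) - delay then (fun t : Nat => (bseq delay (t + 1)).toNat) t else 0) := by
    funext t
    congr 1
    simp only [eq_iff_iff]
    omega
  rw [heq, sum_single]
  by_cases h : 1 ≤ delay ∧ 1 ≤ ((n : Int) + 1) - delay
  · rw [if_pos (by omega : 0 ≤ (n : Int) - delay ∧ (n : Int) - delay < (n : Int)), if_pos h]
    have ht : ((n : Int) - delay).toNat + 1 = (((n : Int) + 1) - delay).toNat := by omega
    rw [ht, Int.toNat_of_nonneg (by have := bseq_pos delay ((((n : Int) + 1) - delay).toNat); omega)]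
  · rw [if_neg (by omega), if_neg h]
    rfl

theorem map_aList (delay : Int) (n : Nat) :
    (aList delay n).map (· - 1) ++ List.replicate (bseq delay (n + 1)).toNat delay
    = aList delay (n + 1) := by
  unfold aList
  rw [List.range_succ, List.flatMap_append, List.map_flatMap]
  congr 1
  · congr 1
    funext t
    simp only [List.map_replicate]
    congr 1
    push_cast
    ring
  · simp only [List.flatMap_cons, List.flatMap_nil, List.append_nil]
    congr 1
    push_cast
    ring

theorem a_inv (delay : Int) (n : Nat) :
    (PySem.List.pyRange 1 ((n : Int) + 1) 1).foldl
      (fun (st : List Int × Int) _ =>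
        let p := st.1.foldl
          (fun (q : List Int × Int) x =>
            (q.1 ++ [x - 1], if x - 1 = 0 then q.2 + 1 else q.2))
          ([], (0 : Int))
        let b := st.2 + p.2
        let a := (PySem.List.pyRange 0 b 1).foldl (fun (l : List Int) _ => l ++ [delay]) p.1
        (a, b))
      ([], (1 : Int))
    = (aList delay n, bseq delay n) := by
  induction n with
  | zero =>
    rw [PySem.List.pyRange_one_eq_nil (by omega)]
    simp [aList, bseq, bhist]
  | succ n ih =>
    have hc : ((n + 1 : Nat) : Int) + 1 = ((n : Int) + 1) + 1 := by push_cast; ring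
    rw [hc, PySem.List.pyRange_one_succ_right (show (1:Int) ≤ (n : Int) + 1 by omega),
      List.foldl_append, ih]
    simp only [List.foldl_cons, List.foldl_nil, inner_loop, List.nil_append, Int.zero_add]
    have hb1 : bseq delay n + ((aList delay n).count 1 : Int) = bseq delay (n + 1) := by
      rw [count_aList, bseq_succ]
    rw [hb1, append_loop delay _ (by have := bseq_pos delay (n + 1); omega), map_aList]

theorem length_aList (delay : Int) (n : Nat) :
    ((aList delay n).length : Int) = totsum delay n := by
  unfold aList totsum
  rw [List.length_flatMap, Nat.cast_list_sum, List.map_map]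
  congr 1
  apply List.map_congr_left
  intro t _
  simp only [Function.comp_apply, List.length_replicate]
  exact Int.toNat_of_nonneg (by have := bseq_pos delay (t + 1); omega)

-- ===== VERDICT (by name: the statement is the Claim_ definition above) =====
theorem solution_spec : Claim_equal_solution := by
  intro delay N _
  show solution delay N = solution_alt delay N
  unfold solution solution_alt
  have hN : (N + 1 : Int) = ((N.toNat : Int) + 1) ∨ N + 1 ≤ 1 := by omega
  rcases hN with h | h
  · rw [h, a_inv, b_inv]
    simp only
    rw [length_aList]
  · rw [PySem.List.pyRange_one_eq_nil h]
    simp
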